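-- pv_equiv track=rewrite | github.com/mahditaharb-maker/myfiles | 4 (5).py | exists_nontrivial_abc
-- ===== SOURCE A (Python) =====
-- import math
--
-- def exists_nontrivial_abc(p):
--     target = p - 1
--     cycle = p - 1
--
--     for a in range(2, p):
--         if math.gcd(a, p) != 1:
--             continue
--         for b in range(2, cycle):
--             bm = b % cycle
--             for c in range(2, cycle):
--                 if pow(a, (bm * (c % cycle)) % cycle, p) == target:
--                     return True
--     return False
-- ===== SOURCE B (Python) =====
-- import math
--
-- def exists_nontrivial_abc(p):
--     # The exponents (b*c) % (p-1) realized with 2 <= b, c < p-1 are exactly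
--     # 1..p-3 (plus values that can never satisfy the test), so scan each
--     # candidate exponent once per base instead of every (b, c) pair.
--     cycle = p - 1
--     if cycle < 3:
--         return False
--     for a in range(2, p):
--         if math.gcd(a, p) == 1:
--             for e in range(1, cycle):
--                 if pow(a, e, p) == p - 1:
--                     return True
--     return False
-- ===== Notes on version B (the rewrite author's own statement) =====
-- stated objective: alternative
-- what changed: B replaces A's quadratic scan over all pairs (b, c) per base by a single linear scan over the candidate exponents 1..p-3, which are exactly the values (b*c) % (p-1) can usefully take.
import Mathlib
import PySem

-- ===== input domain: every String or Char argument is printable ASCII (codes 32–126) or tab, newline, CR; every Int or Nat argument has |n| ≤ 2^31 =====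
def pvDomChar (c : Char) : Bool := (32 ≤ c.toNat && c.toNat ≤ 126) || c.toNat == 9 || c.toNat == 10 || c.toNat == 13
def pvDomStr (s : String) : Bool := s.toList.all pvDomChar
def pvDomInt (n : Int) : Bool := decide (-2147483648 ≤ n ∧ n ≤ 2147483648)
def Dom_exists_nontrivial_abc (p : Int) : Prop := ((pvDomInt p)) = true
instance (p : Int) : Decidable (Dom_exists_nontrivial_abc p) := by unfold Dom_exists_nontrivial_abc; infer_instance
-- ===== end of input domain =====

-- B replaces A's quadratic scan over all pairs (b, c) by a single scan over the candidate
-- exponents 1..p-3 (exactly the useful values (b*c) % (p-1) can take), per base a.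

-- ===== PORT A =====
def exists_nontrivial_abc (p : Int) : Bool :=
  let target := p - 1
  let cycle := p - 1
  (PySem.List.pyRange 2 p 1).any (fun a =>
    if Int.gcd a p ≠ 1 then false
    else (PySem.List.pyRange 2 cycle 1).any (fun b =>
      let bm := PySem.Int.mod b cycle
      (PySem.List.pyRange 2 cycle 1).any (fun c =>
        PySem.Int.powMod a (PySem.Int.mod (bm * PySem.Int.mod c cycle) cycle).toNat p == target)))

-- ===== PORT B =====
def exists_nontrivial_abc_alt (p : Int) : Bool :=
  let cycle := p - 1
  if cycle < 3 then false
  else (PySem.List.pyRange 2 p 1).any (fun a =>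
    (Int.gcd a p == 1) &&
      (PySem.List.pyRange 1 cycle 1).any (fun e =>
        PySem.Int.powMod a e.toNat p == p - 1))

-- ===== PRECONDITION & SPEC =====
def Spec_exists_nontrivial_abc (p : Int) (out : Bool) : Prop := out = exists_nontrivial_abc_alt p
instance (p : Int) (out : Bool) : Decidable (Spec_exists_nontrivial_abc p out) := by unfold Spec_exists_nontrivial_abc; infer_instance

-- ===== CLAIM (what is proved, stated in full; the proofs are below) =====
def Claim_equal_exists_nontrivial_abc : Prop := ∀ (p : Int), Dom_exists_nontrivial_abc p → Spec_exists_nontrivial_abc p (exists_nontrivial_abc p)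

-- ===== LEMMAS AND PROOFS =====

-- Python's % with a positive modulus is emod
theorem pymod_emod (x m : Int) (hm : 0 < m) : PySem.Int.mod x m = x % m := by
  simp only [PySem.Int.mod, Int.fmod_eq_emod, if_pos (Or.inl hm.le), add_zero]

theorem pymod_self (x m : Int) (h0 : 0 ≤ x) (h1 : x < m) : PySem.Int.mod x m = x := by
  rw [pymod_emod x m (by omega), Int.emod_eq_of_lt h0 h1]

-- every exponent 1 ≤ e < m is (b*c) % m for some b, c ∈ [2, m), as long as m ≥ 7
theorem realize_exponent (m e : Int) (hm : 7 ≤ m) (he1 : 1 ≤ e) (hem : e < m) :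
    ∃ b c : Int, (2 ≤ b ∧ b < m) ∧ (2 ≤ c ∧ c < m) ∧ (b * c) % m = e := by
  by_cases hle : e ≤ m - 2
  · refine ⟨m - 1, m - e, ⟨by omega, by omega⟩, ⟨by omega, by omega⟩, ?_⟩
    have h : (m - 1) * (m - e) = e + m * (m - e - 1) := by ring
    rw [h, Int.add_mul_emod_self_left, Int.emod_eq_of_lt (by omega) (by omega)]
  · have he : e = m - 1 := by omega
    rcases Int.even_or_odd m with ⟨n, hn⟩ | ⟨k, hk⟩
    · -- m even: pick an odd unit u near m/2 and solve u * c ≡ m - 1 via Bézout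
      obtain ⟨u, hu2, hulo, hodd, hrep⟩ :
          ∃ u : Int, 2 ≤ u ∧ u ≤ m - 2 ∧ Odd u ∧ (m = 2 + u * 2 ∨ m = 4 + u * 2) := by
        rcases Int.even_or_odd n with ⟨j, hj⟩ | ⟨j, hj⟩
        · exact ⟨n - 1, by omega, by omega, ⟨j - 1, by omega⟩, Or.inl (by omega)⟩
        · exact ⟨n - 2, by omega, by omega, ⟨j - 1, by omega⟩, Or.inr (by omega)⟩
      obtain ⟨t, ht⟩ := hodd
      have hco2 : IsCoprime u (2 : Int) := ⟨1, -t, by omega⟩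
      have hco : IsCoprime u m := by
        have h4 : IsCoprime u (4 : Int) := by
          have h := hco2.mul_right hco2
          norm_num at h
          exact h
        rcases hrep with h | h
        · rw [h]; exact hco2.add_mul_left_right 2
        · rw [h]; exact h4.add_mul_left_right 2
      obtain ⟨x, y, hxy⟩ := hco
      have hcnn : 0 ≤ ((m - 1) * x) % m := Int.emod_nonneg _ (by omega)
      have hclt : ((m - 1) * x) % m < m := Int.emod_lt_of_pos _ (by omega)
      have hval : (u * (((m - 1) * x) % m)) % m = m - 1 := by
        rw [Int.mul_emod, Int.emod_emod_of_dvd _ dvd_rfl, ← Int.mul_emod]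
        have h2 : u * ((m - 1) * x) = (m - 1) * (x * u) := by ring
        have h3 : x * u = 1 - y * m := by omega
        rw [h2, h3, show (m - 1) * (1 - y * m) = (m - 1) + m * (-(y * (m - 1))) by ring,
          Int.add_mul_emod_self_left, Int.emod_eq_of_lt (by omega) (by omega)]
      refine ⟨u, ((m - 1) * x) % m, ⟨by omega, by omega⟩, ⟨?_, hclt⟩, by rw [hval, he]⟩
      by_cases h0 : ((m - 1) * x) % m = 0
      · rw [h0, mul_zero] at hval; simp at hval; omega
      · by_cases h1 : ((m - 1) * x) % m = 1
        · rw [h1, mul_one, Int.emod_eq_of_lt (by omega) (by omega)] at hval; omega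
        · omega
    · -- m odd: (m-1) = 2 * k with k = (m-1)/2
      refine ⟨2, k, ⟨by omega, by omega⟩, ⟨by omega, by omega⟩, ?_⟩
      rw [show (2 : Int) * k = m - 1 by omega, Int.emod_eq_of_lt (by omega) (by omega), he]

-- for p ≥ 8 the two inner scans agree on every base a
theorem inner_eq (p a : Int) (hp : 8 ≤ p) :
    ((PySem.List.pyRange 2 (p-1) 1).any (fun b =>
      (PySem.List.pyRange 2 (p-1) 1).any (fun c =>
        PySem.Int.powMod a (PySem.Int.mod (PySem.Int.mod b (p-1) * PySem.Int.mod c (p-1)) (p-1)).toNat p == p - 1)))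
    = (PySem.List.pyRange 1 (p-1) 1).any (fun e => PySem.Int.powMod a e.toNat p == p - 1) := by
  rw [Bool.eq_iff_iff]
  simp only [List.any_eq_true, PySem.List.mem_pyRange_one]
  constructor
  · rintro ⟨b, ⟨hb2, hbm⟩, c, ⟨hc2, hcm⟩, hP⟩
    rw [pymod_self b (p-1) (by omega) hbm, pymod_self c (p-1) (by omega) hcm,
      pymod_emod (b*c) (p-1) (by omega)] at hP
    have hnn : 0 ≤ (b*c) % (p-1) := Int.emod_nonneg _ (by omega)
    have hlt : (b*c) % (p-1) < p - 1 := Int.emod_lt_of_pos _ (by omega)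
    by_cases h0 : (b*c) % (p-1) = 0
    · rw [h0] at hP
      simp only [PySem.Int.powMod, Int.toNat_zero, pow_zero] at hP
      rw [pymod_self 1 p (by omega) (by omega)] at hP
      exact absurd (by exact_mod_cast of_decide_eq_true hP) (by omega)
    · exact ⟨(b*c) % (p-1), ⟨by omega, hlt⟩, hP⟩
  · rintro ⟨e, ⟨he1, hem⟩, hP⟩
    obtain ⟨b, c, ⟨hb2, hbm⟩, ⟨hc2, hcm⟩, hbc⟩ :=
      realize_exponent (p-1) e (by omega) he1 hem
    refine ⟨b, ⟨hb2, hbm⟩, c, ⟨hc2, hcm⟩, ?_⟩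
    rw [pymod_self b (p-1) (by omega) hbm, pymod_self c (p-1) (by omega) hcm,
      pymod_emod (b*c) (p-1) (by omega), hbc]
    exact hP

theorem main_eq (p : Int) (hp : 8 ≤ p) :
    exists_nontrivial_abc p = exists_nontrivial_abc_alt p := by
  unfold exists_nontrivial_abc exists_nontrivial_abc_alt
  rw [if_neg (by omega)]
  apply PySem.List.any_congr_mem
  intro a _
  by_cases hg : Int.gcd a p = 1
  · rw [if_neg (by simp [hg])]
    simp only [hg, beq_self_eq_true, Bool.true_and]
    exact inner_eq p a hp
  · rw [if_pos (by simp [hg])]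
    simp [hg]

theorem small_eq (p : Int) (hp : p ≤ 3) :
    exists_nontrivial_abc p = exists_nontrivial_abc_alt p := by
  unfold exists_nontrivial_abc exists_nontrivial_abc_alt
  rw [if_pos (by omega)]
  rw [List.any_eq_false.mpr]
  intro a _
  rw [PySem.List.pyRange_one_eq_nil (by omega : (p:Int) - 1 ≤ 2)]
  simp

-- ===== VERDICT (by name: the statement is the Claim_ definition above) =====
theorem exists_nontrivial_abc_spec : Claim_equal_exists_nontrivial_abc := by
  intro p _
  unfold Spec_exists_nontrivial_abc
  by_cases h : p < 4
  · exact small_eq p (by omega)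
  · by_cases h8 : p < 8
    · have : p = 4 ∨ p = 5 ∨ p = 6 ∨ p = 7 := by omega
      rcases this with rfl | rfl | rfl | rfl <;> decide
    · exact main_eq p (by omega)
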